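-- pv_equiv track=rewrite | github.com/Saurashtr02/News_Summarizer | news_summarizer/temp.py | match_claims_with_article
-- ===== SOURCE A (Python) =====
-- def match_claims_with_article(keywords, fact_check_info):
--     matched_claims = []
--     keywords_lower = [keyword.lower() for keyword in keywords]
--
--     for claim in fact_check_info:
--         claim_text = claim.get('claim_text', '').lower()
--
--         for keyword in keywords_lower:
--             if keyword in claim_text:
--                 matched_claims.append(claim)
--                 break
--
--     return matched_claims
-- ===== SOURCE B (Python) =====
-- def match_claims_with_article(keywords, fact_check_info):
--     texts = [claim.get('claim_text', '').lower() for claim in fact_check_info]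
--     hit = set()
--     for keyword in keywords:
--         k = keyword.lower()
--         for i, t in enumerate(texts):
--             if i not in hit and k in t:
--                 hit.add(i)
--     return [claim for i, claim in enumerate(fact_check_info) if i in hit]
-- ===== Notes on version B (the rewrite author's own statement) =====
-- stated objective: alternative
-- what changed: Inverts the loop nesting: instead of scanning keywords inside a per-claim loop with break-and-append, B precomputes lowercased texts, runs a keyword-major pass that collects matched claim indices into a set, and rebuilds the output in one final pass over the claims.
import Mathlib
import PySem

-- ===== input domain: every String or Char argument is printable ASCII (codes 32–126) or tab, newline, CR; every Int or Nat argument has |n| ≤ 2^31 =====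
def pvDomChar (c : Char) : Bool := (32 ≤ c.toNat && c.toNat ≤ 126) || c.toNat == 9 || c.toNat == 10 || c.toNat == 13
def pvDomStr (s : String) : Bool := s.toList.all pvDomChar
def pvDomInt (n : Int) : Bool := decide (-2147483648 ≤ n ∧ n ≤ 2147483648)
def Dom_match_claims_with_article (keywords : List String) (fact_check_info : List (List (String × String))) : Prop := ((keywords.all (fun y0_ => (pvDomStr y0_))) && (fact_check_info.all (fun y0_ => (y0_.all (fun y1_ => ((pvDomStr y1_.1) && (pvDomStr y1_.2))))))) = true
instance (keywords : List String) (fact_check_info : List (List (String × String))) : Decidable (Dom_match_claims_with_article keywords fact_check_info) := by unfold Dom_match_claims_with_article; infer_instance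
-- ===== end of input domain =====

-- B inverts A's loop nesting: a keyword-major pass collects matched claim indices into a set,
-- then one final pass over the claims rebuilds the output; objective: alternative.

-- ===== PORT A =====
def match_claims_with_article (keywords : List String) (fact_check_info : List (List (String × String))) : List (List (String × String)) :=
  let keywords_lower := keywords.map PySem.Str.lower
  fact_check_info.foldl (fun matched_claims claim =>
    let claim_text := PySem.Str.lower ((PySem.Dict.mk claim).getD "claim_text" "")
    -- 'for keyword in keywords_lower: if keyword in claim_text: append; break'
    -- appends claim exactly when some keyword is in claim_text
    if keywords_lower.any (fun keyword => PySem.Str.isIn keyword claim_text)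
    then matched_claims ++ [claim] else matched_claims) []

-- ===== PORT B =====
def match_claims_with_article_alt (keywords : List String) (fact_check_info : List (List (String × String))) : List (List (String × String)) :=
  let texts := fact_check_info.map (fun claim => PySem.Str.lower ((PySem.Dict.mk claim).getD "claim_text" ""))
  let hit := keywords.foldl (fun s keyword =>
    -- 'k = keyword.lower()' inlined
    (PySem.List.enumerate texts).foldl (fun s p =>
      if !(PySem.Set.contains s p.1) && PySem.Str.isIn (PySem.Str.lower keyword) p.2
      then PySem.Set.add s p.1 else s) s)
    PySem.Set.empty
  ((PySem.List.enumerate fact_check_info).filter (fun p => PySem.Set.contains hit p.1)).map (fun p => p.2)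

-- ===== PRECONDITION & SPEC =====
def Spec_match_claims_with_article (keywords : List String) (fact_check_info : List (List (String × String))) (out : List (List (String × String))) : Prop := out = match_claims_with_article_alt keywords fact_check_info
instance (keywords : List String) (fact_check_info : List (List (String × String))) (out : List (List (String × String))) : Decidable (Spec_match_claims_with_article keywords fact_check_info out) := by unfold Spec_match_claims_with_article; infer_instance

-- ===== CLAIM (what is proved, stated in full; the proofs are below) =====
def Claim_equal_match_claims_with_article : Prop := ∀ (keywords : List String) (fact_check_info : List (List (String × String))), Dom_match_claims_with_article keywords fact_check_info → Spec_match_claims_with_article keywords fact_check_info (match_claims_with_article keywords fact_check_info)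

-- ===== LEMMAS AND PROOFS =====

theorem pv_bool_eq_of_iff {a b : Bool} (h : a = true ↔ b = true) : a = b := by
  cases a <;> cases b <;> simp_all

-- membership after the inner loop over enumerated texts
theorem pv_inner_mem (k : String) (l : List (Int × String)) (s : PySem.Set Int) (j : Int) :
    PySem.Set.contains
      (l.foldl (fun s p =>
        if !(PySem.Set.contains s p.1) && PySem.Str.isIn k p.2 then PySem.Set.add s p.1 else s) s) j = true
    ↔ PySem.Set.contains s j = true ∨ ∃ p ∈ l, p.1 = j ∧ PySem.Str.isIn k p.2 = true := by
  induction l generalizing s with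
  | nil => simp
  | cons p l ih =>
    simp only [List.foldl_cons, ih]
    by_cases hc : (!(PySem.Set.contains s p.1) && PySem.Str.isIn k p.2) = true
    · rw [if_pos hc]
      simp only [Bool.and_eq_true, Bool.not_eq_true'] at hc
      simp only [PySem.Set.contains_iff, PySem.Set.mem_add, List.mem_cons]
      constructor
      · rintro (⟨hj | hj⟩ | h)
        · exact Or.inl hj
        · exact Or.inr ⟨p, Or.inl rfl, hj.symm, hc.2⟩
        · obtain ⟨q, hq, hqj, hqk⟩ := h
          exact Or.inr ⟨q, Or.inr hq, hqj, hqk⟩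
      · rintro (hj | ⟨q, hq | hq, hqj, hqk⟩)
        · exact Or.inl (Or.inl hj)
        · exact Or.inl (Or.inr (by rw [← hqj, hq]))
        · exact Or.inr ⟨q, hq, hqj, hqk⟩
    · rw [if_neg hc]
      simp only [Bool.and_eq_true, Bool.not_eq_true', not_and_or, Bool.not_eq_false,
        Bool.not_eq_true] at hc
      simp only [PySem.Set.contains_iff, List.mem_cons]
      constructor
      · rintro (hj | ⟨q, hq, hqj, hqk⟩)
        · exact Or.inl hj
        · exact Or.inr ⟨q, Or.inr hq, hqj, hqk⟩
      · rintro (hj | ⟨q, hq | hq, hqj, hqk⟩)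
        · exact Or.inl hj
        · rcases hc with hc | hc
          · rw [← hqj, hq]
            exact Or.inl ((PySem.Set.contains_iff _ _).mp hc)
          · rw [hq] at hqk
            rw [hqk] at hc
            simp at hc
        · exact Or.inr ⟨q, hq, hqj, hqk⟩

-- membership after the outer loop over keywords
theorem pv_outer_mem (keywords : List String) (E : List (Int × String)) (s : PySem.Set Int) (j : Int) :
    PySem.Set.contains
      (keywords.foldl (fun s keyword =>
        E.foldl (fun s p =>
          if !(PySem.Set.contains s p.1) && PySem.Str.isIn (PySem.Str.lower keyword) p.2
          then PySem.Set.add s p.1 else s) s) s) j = true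
    ↔ PySem.Set.contains s j = true ∨
      ∃ kw ∈ keywords, ∃ p ∈ E, p.1 = j ∧ PySem.Str.isIn (PySem.Str.lower kw) p.2 = true := by
  induction keywords generalizing s with
  | nil => simp
  | cons kw kws ih =>
    simp only [List.foldl_cons, ih, pv_inner_mem, List.mem_cons]
    constructor
    · rintro ((hj | ⟨p, hp, hpj, hpk⟩) | ⟨w, hw, hrest⟩)
      · exact Or.inl hj
      · exact Or.inr ⟨kw, Or.inl rfl, p, hp, hpj, hpk⟩
      · exact Or.inr ⟨w, Or.inr hw, hrest⟩
    · rintro (hj | ⟨w, hw | hw, hrest⟩)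
      · exact Or.inl (Or.inl hj)
      · exact Or.inl (Or.inr (hw ▸ hrest))
      · exact Or.inr ⟨w, hw, hrest⟩

-- dropping the indices of an enumerate-filter when the test only looks at the element
theorem pv_filter_enumerate_map {α : Type} (q : α → Bool) (l : List α) (s : Int) :
    (((PySem.List.enumerate l s).filter (fun p => q p.2)).map (fun p => p.2)) = l.filter q := by
  induction l generalizing s with
  | nil => simp [PySem.List.enumerate_nil]
  | cons x xs ih =>
    rw [PySem.List.enumerate_cons]
    by_cases hq : q x
    · simp [hq, ih]
    · simp [hq, ih]

-- ===== VERDICT (by name: the statement is the Claim_ definition above) =====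
theorem match_claims_with_article_spec : Claim_equal_match_claims_with_article := by
  intro keywords fact_check_info _
  unfold Spec_match_claims_with_article match_claims_with_article match_claims_with_article_alt
  rw [PySem.List.foldl_append_if_eq_filter]
  simp only [List.nil_append]
  rw [← pv_filter_enumerate_map (fun claim =>
        (keywords.map PySem.Str.lower).any (fun keyword =>
          PySem.Str.isIn keyword (PySem.Str.lower ((PySem.Dict.mk claim).getD "claim_text" ""))))
      fact_check_info 0]
  congr 1
  apply List.filter_congr
  intro p hp
  apply pv_bool_eq_of_iff
  rw [pv_outer_mem]
  obtain ⟨i, hi, rfl⟩ := (PySem.List.mem_enumerate_iff _ _ _).mp hp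
  simp only [PySem.Set.contains_iff, PySem.Set.empty, List.not_mem_nil, false_or,
    List.any_eq_true, List.mem_map]
  constructor
  · rintro ⟨k, ⟨kw, hkw, rfl⟩, hk⟩
    refine ⟨kw, hkw, (0 + (i : Int),
      (fact_check_info.map (fun claim =>
        PySem.Str.lower ((PySem.Dict.mk claim).getD "claim_text" "")))[i]'(by simpa using hi)),
      (PySem.List.mem_enumerate_iff _ _ _).mpr ⟨i, by simpa using hi, rfl⟩, rfl, ?_⟩
    simpa using hk
  · rintro ⟨kw, hkw, q, hq, hqj, hqk⟩
    obtain ⟨m, hm, rfl⟩ := (PySem.List.mem_enumerate_iff _ _ _).mp hq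
    have hmi : m = i := by
      simp only at hqj
      omega
    subst hmi
    refine ⟨PySem.Str.lower kw, ⟨kw, hkw, rfl⟩, ?_⟩
    simpa using hqk
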